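-- pv_equiv track=rewrite | github.com/hailehong95/threat-intelligence-bot | tlgbot/tlg_utils.py | sd_key_validator
-- ===== SOURCE A (Python) =====
-- import string
--
-- def sd_key_validator(key):
--     """ Validation Shodan API Key """
--     if len(key) != 32:
--         return False
--     letters = list(string.ascii_letters + string.digits)
--     for chr_ in list(key):
--         if chr_ not in letters:
--             return False
--     return True
-- ===== SOURCE B (Python) =====
-- import string
--
-- def sd_key_validator(key):
--     """ Validation Shodan API Key """
--     # A key is valid iff it has length 32 and stripping every allowed
--     # character from both ends leaves nothing: any disallowed character
--     # would survive the strip, so the stripped string is empty iff all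
--     # characters are alphanumeric.
--     return len(key) == 32 and key.strip(string.ascii_letters + string.digits) == ''
-- ===== Notes on version B (the rewrite author's own statement) =====
-- stated objective: idiomatic
-- what changed: A's explicit per-character membership loop over a 62-element list with early return is replaced by str.strip over the alphanumeric charset: the key stripped of allowed characters must be the empty string (a string strips to empty iff every character is allowed), plus the same length guard.
import Mathlib
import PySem

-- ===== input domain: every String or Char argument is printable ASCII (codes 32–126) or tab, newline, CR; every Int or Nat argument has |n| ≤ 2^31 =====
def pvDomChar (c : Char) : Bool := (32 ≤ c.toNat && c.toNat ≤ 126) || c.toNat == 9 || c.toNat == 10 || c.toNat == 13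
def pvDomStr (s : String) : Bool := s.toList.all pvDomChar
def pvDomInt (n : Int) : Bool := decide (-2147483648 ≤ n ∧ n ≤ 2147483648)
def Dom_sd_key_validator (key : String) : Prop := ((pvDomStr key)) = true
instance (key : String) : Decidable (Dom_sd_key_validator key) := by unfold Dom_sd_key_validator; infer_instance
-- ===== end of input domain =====

-- B replaces A's per-character membership loop by str.strip over the alphanumeric
-- charset plus a length guard (idiomatic rewrite, same cost).

-- ===== PORT A =====
-- string.ascii_letters + string.digits, as a list of chars (A's `letters`)
def sdLetters : List Char :=
  "abcdefghijklmnopqrstuvwxyzABCDEFGHIJKLMNOPQRSTUVWXYZ0123456789".toList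

-- the `for chr_ in list(key): if chr_ not in letters: return False` loop
def sdLoop : List Char → Bool
  | [] => true
  | c :: rest => if ¬ sdLetters.contains c then false else sdLoop rest

def sd_key_validator (key : String) : Bool :=
  if key.toList.length ≠ 32 then false
  else sdLoop key.toList

-- ===== PORT B =====
-- Python's str.strip(chars): drop chars in `chars` from the front, then from the
-- back (exact for this use: strip with an explicit char set).
def sdStripChars (chars l : List Char) : List Char :=
  ((l.dropWhile chars.contains).reverse.dropWhile chars.contains).reverse

def sd_key_validator_alt (key : String) : Bool :=
  key.toList.length == 32 && (sdStripChars sdLetters key.toList == [])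

-- ===== PRECONDITION & SPEC =====
def Spec_sd_key_validator (key : String) (out : Bool) : Prop := out = sd_key_validator_alt key
instance (key : String) (out : Bool) : Decidable (Spec_sd_key_validator key out) := by unfold Spec_sd_key_validator; infer_instance

-- ===== CLAIM (what is proved, stated in full; the proofs are below) =====
def Claim_equal_sd_key_validator : Prop := ∀ (key : String), Dom_sd_key_validator key → Spec_sd_key_validator key (sd_key_validator key)

-- ===== LEMMAS AND PROOFS =====

-- A's loop returns true iff every character is in `letters`
theorem sdLoop_eq_all (l : List Char) : sdLoop l = l.all sdLetters.contains := by
  induction l with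
  | nil => rfl
  | cons c rest ih => simp [sdLoop, List.all_cons, ih]

-- stripping allowed chars from both ends yields [] iff every char is allowed
theorem sdStrip_empty_iff (l : List Char) :
    (sdStripChars sdLetters l = []) ↔ ∀ x ∈ l, sdLetters.contains x := by
  unfold sdStripChars
  rw [List.reverse_eq_nil_iff, List.dropWhile_eq_nil_iff]
  constructor
  · intro h
    have hfront : l.dropWhile sdLetters.contains = [] := by
      rcases hl : l.dropWhile sdLetters.contains with _ | ⟨c, rest⟩
      · rfl
      · exfalso
        have hc : c ∈ (l.dropWhile sdLetters.contains).reverse := by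
          rw [hl]; simp
        have := h c hc
        have hhead := List.head?_dropWhile_not sdLetters.contains l
        rw [hl] at hhead
        simp at hhead
        simp [hhead] at this
    rw [List.dropWhile_eq_nil_iff] at hfront
    simpa using hfront
  · intro h x hx
    have hx' : x ∈ l.dropWhile sdLetters.contains := by
      simpa using hx
    exact h x ((List.dropWhile_sublist _).subset hx')

-- ===== VERDICT =====
theorem sd_key_validator_spec : Claim_equal_sd_key_validator := by
  intro key _
  unfold Spec_sd_key_validator sd_key_validator sd_key_validator_alt
  by_cases h : key.toList.length = 32
  · simp only [h, ne_eq, not_true_eq_false, if_false, beq_self_eq_true, Bool.true_and]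
    rw [sdLoop_eq_all, Bool.eq_iff_iff, List.all_eq_true, beq_iff_eq, sdStrip_empty_iff]
  · simp only [ne_eq, h, not_false_eq_true, if_true]
    have h2 : (key.toList.length == 32) = false := by simpa using h
    rw [h2, Bool.false_and]
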